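-- pv_equiv track=rewrite | github.com/ChepelevAlexandr/MultiLevelPredClassBuilder | unifier.py | is_isomorphic_args
-- ===== SOURCE A (Python) =====
-- from typing import List, Dict, Tuple, Set
--
-- def is_isomorphic_args(args1: List[str], args2: List[str]) -> bool:
--     """
--     Check if two lists of arguments are isomorphic up to renaming of lowercase vars.
--     """
--     if len(args1) != len(args2):
--         return False
--     mapping: Dict[str, str] = {}
--     used: Set[str] = set()
--     for a1, a2 in zip(args1, args2):
--         if a1.islower() and a2.islower():
--             if a1 in mapping:
--                 if mapping[a1] != a2:
--                     return False
--             else: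
--                 if a2 in used:
--                     return False
--                 mapping[a1] = a2
--                 used.add(a2)
--         elif a1.islower() or a2.islower():
--             # one is var, the other is constant → not isomorphic
--             return False
--         else:
--             if a1 != a2:
--                 return False
--     return True
-- ===== SOURCE B (Python) =====
-- def is_isomorphic_args(args1, args2):
--     """Normalize each list to a canonical pattern (first-occurrence index for
--     lowercase variables, the token itself for constants) and compare."""
--     def pattern(args):
--         return [('v', args.index(t)) if t.islower() else ('c', t) for t in args]
--     return pattern(args1) == pattern(args2)
-- ===== Notes on version B (the rewrite author's own statement) =====
-- stated objective: alternative
-- what changed: Replaces A's incremental mapping+used bijection check with normalizing both lists into canonical first-occurrence patterns and comparing them for equality.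
import Mathlib
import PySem

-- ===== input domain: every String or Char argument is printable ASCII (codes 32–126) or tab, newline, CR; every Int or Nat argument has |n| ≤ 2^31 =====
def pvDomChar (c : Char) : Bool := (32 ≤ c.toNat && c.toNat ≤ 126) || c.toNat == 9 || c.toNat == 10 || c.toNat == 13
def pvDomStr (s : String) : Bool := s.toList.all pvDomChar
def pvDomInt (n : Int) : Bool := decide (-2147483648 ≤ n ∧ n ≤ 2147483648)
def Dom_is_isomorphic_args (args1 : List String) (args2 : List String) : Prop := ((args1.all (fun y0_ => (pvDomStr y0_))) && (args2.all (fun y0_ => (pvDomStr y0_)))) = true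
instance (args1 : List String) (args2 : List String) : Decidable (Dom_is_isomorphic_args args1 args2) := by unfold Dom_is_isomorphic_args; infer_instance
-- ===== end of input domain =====

-- B replaces A's incremental mapping/used bijection check by normalizing each list
-- to a canonical first-occurrence pattern and comparing the two patterns (alternative decomposition).

-- ===== PORT A =====
-- Python str.islower(): at least one cased character and no uppercase one (exact on ASCII strings)
def pvIslower (s : String) : Bool :=
  s.toList.any PySem.Chars.islower && s.toList.all (fun c => !PySem.Chars.isupper c)

-- the 'for a1, a2 in zip(args1, args2)' loop with its early returns, state = (mapping, used)
def pvIsoLoop : List (String × String) → PySem.Dict String String → PySem.Set String → Bool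
  | [], _, _ => true
  | (a1, a2) :: rest, mapping, used =>
    if pvIslower a1 && pvIslower a2 then
      match mapping.get? a1 with
      | some v => if v ≠ a2 then false else pvIsoLoop rest mapping used
      | none =>
        if used.contains a2 then false
        else pvIsoLoop rest (mapping.insert a1 a2) (PySem.Set.add used a2)
    else if pvIslower a1 || pvIslower a2 then false
    else if a1 ≠ a2 then false else pvIsoLoop rest mapping used

def is_isomorphic_args (args1 : List String) (args2 : List String) : Bool :=
  if args1.length ≠ args2.length then false
  else pvIsoLoop (args1.zip args2) PySem.Dict.empty PySem.Set.empty

-- ===== PORT B =====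
-- canonical pattern token: ('v', first-occurrence index) for variables, ('c', token) for constants
inductive PvTok
  | var : Int → PvTok
  | const : String → PvTok
deriving DecidableEq, Repr

-- args.index(t): t is always a member of args here, so .index never raises; getD 0 is a dead default
def pvPattern (args : List String) : List PvTok :=
  args.map (fun t =>
    if pvIslower t then PvTok.var (((PySem.List.index? args t).getD 0 : Nat) : Int)
    else PvTok.const t)

def is_isomorphic_args_alt (args1 : List String) (args2 : List String) : Bool :=
  decide (pvPattern args1 = pvPattern args2)

-- ===== PRECONDITION & SPEC =====
def Spec_is_isomorphic_args (args1 : List String) (args2 : List String) (out : Bool) : Prop := out = is_isomorphic_args_alt args1 args2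
instance (args1 : List String) (args2 : List String) (out : Bool) : Decidable (Spec_is_isomorphic_args args1 args2 out) := by unfold Spec_is_isomorphic_args; infer_instance

-- ===== CLAIM (what is proved, stated in full; the proofs are below) =====
def Claim_equal_is_isomorphic_args : Prop := ∀ (args1 : List String) (args2 : List String), Dom_is_isomorphic_args args1 args2 → Spec_is_isomorphic_args args1 args2 (is_isomorphic_args args1 args2)

-- ===== LEMMAS AND PROOFS =====

theorem pvPattern_length (xs : List String) : (pvPattern xs).length = xs.length := by
  simp [pvPattern]

theorem pvPattern_getElem? (xs : List String) (i : Nat) (h : i < xs.length) :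
    (pvPattern xs)[i]? = some (if pvIslower xs[i] then
      PvTok.var (((PySem.List.index? xs xs[i]).getD 0 : Nat) : Int) else PvTok.const xs[i]) := by
  simp [pvPattern, List.getElem?_eq_getElem h]

-- first-occurrence index basic facts
theorem pvIdx_spec (xs : List String) (t : String) (k : Nat)
    (hk : PySem.List.index? xs t = some k) :
    ∃ _ : k < xs.length, xs[k]? = some t ∧ ∀ j, j < k → xs[j]? ≠ some t := by
  obtain ⟨hlt, hget, hbefore⟩ := PySem.List.getElem_of_index?_eq_some hk
  refine ⟨hlt, by rw [List.getElem?_eq_getElem hlt, hget], ?_⟩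
  intro j hj hc
  have hjl : j < xs.length := by omega
  rw [List.getElem?_eq_getElem hjl] at hc
  exact hbefore j hj (Option.some.inj hc)

theorem pvIdx_exists (xs : List String) (i : Nat) (t : String) (h : xs[i]? = some t) :
    ∃ k, PySem.List.index? xs t = some k ∧ k ≤ i := by
  have hi : i < xs.length := by
    rcases Nat.lt_or_ge i xs.length with h' | h'
    · exact h'
    · rw [List.getElem?_eq_none h'] at h; cases h
  have hmem : t ∈ xs := by
    rw [List.getElem?_eq_getElem hi] at h
    exact (Option.some.inj h) ▸ List.getElem_mem hi
  have hsome : (PySem.List.index? xs t).isSome = true :=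
    (PySem.List.index?_isSome_iff xs t).2 hmem
  obtain ⟨k, hk⟩ := Option.isSome_iff_exists.1 hsome
  refine ⟨k, hk, ?_⟩
  obtain ⟨hlt, hget, hbefore⟩ := pvIdx_spec xs t k hk
  by_contra hc
  exact hbefore i (by omega) h

theorem pvIdx_fresh (xs : List String) (n : Nat) (t : String) (h : xs[n]? = some t)
    (hf : ∀ j, j < n → xs[j]? ≠ some t) : PySem.List.index? xs t = some n := by
  obtain ⟨k, hk, hle⟩ := pvIdx_exists xs n t h
  obtain ⟨hlt, hget, hbefore⟩ := pvIdx_spec xs t k hk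
  have : k = n := by
    rcases Nat.lt_or_ge k n with hlt2 | hge
    · exact absurd hget (hf k hlt2)
    · omega
  exact this ▸ hk

theorem pvIdx_inj (xs : List String) (t t' : String) (k : Nat)
    (h1 : PySem.List.index? xs t = some k) (h2 : PySem.List.index? xs t' = some k) : t = t' := by
  obtain ⟨_, hg1, _⟩ := pvIdx_spec xs t k h1
  obtain ⟨_, hg2, _⟩ := pvIdx_spec xs t' k h2
  rw [hg1] at hg2
  exact Option.some.inj hg2

-- the main loop invariant
theorem pvLoop_eq (xs ys : List String) (hlen : xs.length = ys.length) :
    ∀ (fuel n : Nat), xs.length - n = fuel → n ≤ xs.length →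
    ∀ (m : PySem.Dict String String) (u : PySem.Set String),
    (∀ a b, m.get? a = some b ↔ ∃ i, i < n ∧ xs[i]? = some a ∧ ys[i]? = some b ∧ pvIslower a = true) →
    (∀ b, u.contains b = true ↔ ∃ i, i < n ∧ ys[i]? = some b ∧ pvIslower b = true) →
    (∀ i, i < n → (pvPattern xs)[i]? = (pvPattern ys)[i]?) →
    pvIsoLoop ((xs.drop n).zip (ys.drop n)) m u
      = decide ((pvPattern xs).drop n = (pvPattern ys).drop n) := by
  intro fuel
  induction fuel with
  | zero =>
    intro n hfuel hn m u hm hu hpat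
    have h1 : xs.drop n = [] := List.drop_eq_nil_of_le (by omega)
    have h2 : ys.drop n = [] := List.drop_eq_nil_of_le (by omega)
    have h3 : (pvPattern xs).drop n = [] := List.drop_eq_nil_of_le (by rw [pvPattern_length]; omega)
    have h4 : (pvPattern ys).drop n = [] := List.drop_eq_nil_of_le (by rw [pvPattern_length]; omega)
    simp [h1, h2, h3, h4, pvIsoLoop]
  | succ fuel ih =>
    intro n hfuel hn m u hm hu hpat
    have hxlt : n < xs.length := by omega
    have hylt : n < ys.length := by omega
    have hpxlt : n < (pvPattern xs).length := by rw [pvPattern_length]; omega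
    have hpylt : n < (pvPattern ys).length := by rw [pvPattern_length]; omega
    set a := xs[n] with ha
    set b := ys[n] with hb
    have hxn : xs[n]? = some a := List.getElem?_eq_getElem hxlt
    have hyn : ys[n]? = some b := List.getElem?_eq_getElem hylt
    have hdx : xs.drop n = a :: xs.drop (n + 1) := List.drop_eq_getElem_cons hxlt
    have hdy : ys.drop n = b :: ys.drop (n + 1) := List.drop_eq_getElem_cons hylt
    have hdpx : (pvPattern xs).drop n = (pvPattern xs)[n] :: (pvPattern xs).drop (n + 1) :=
      List.drop_eq_getElem_cons hpxlt
    have hdpy : (pvPattern ys).drop n = (pvPattern ys)[n] :: (pvPattern ys).drop (n + 1) :=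
      List.drop_eq_getElem_cons hpylt
    have hpaq : (pvPattern xs)[n] = (if pvIslower a then
        PvTok.var (((PySem.List.index? xs a).getD 0 : Nat) : Int) else PvTok.const a) := by
      have := pvPattern_getElem? xs n hxlt
      rw [List.getElem?_eq_getElem hpxlt] at this; injection this
    have hpbq : (pvPattern ys)[n] = (if pvIslower b then
        PvTok.var (((PySem.List.index? ys b).getD 0 : Nat) : Int) else PvTok.const b) := by
      have := pvPattern_getElem? ys n hylt
      rw [List.getElem?_eq_getElem hpylt] at this; injection this
    rw [hdx, hdy, hdpx, hdpy]
    simp only [List.zip_cons_cons, pvIsoLoop]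
    by_cases hla : pvIslower a = true
    · by_cases hlb : pvIslower b = true
      · -- both variables
        simp only [hla, hlb, Bool.and_self, if_true]
        cases hmv : m.get? a with
        | some v =>
          dsimp only
          obtain ⟨i, hi, hxi, hyi, _⟩ := (hm a v).1 hmv
          have hilen : i < xs.length := by omega
          have hilen' : i < ys.length := by omega
          have hxi' : xs[i] = a := by
            rw [List.getElem?_eq_getElem hilen] at hxi; exact Option.some.inj hxi
          have hyi' : ys[i] = v := by
            rw [List.getElem?_eq_getElem hilen'] at hyi; exact Option.some.inj hyi
          have htok := hpat i hi
          rw [pvPattern_getElem? xs i hilen, pvPattern_getElem? ys i hilen',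
              hxi', hyi'] at htok
          rw [if_pos hla] at htok
          have hlv : pvIslower v = true := by
            by_contra hc
            rw [if_neg hc] at htok
            exact PvTok.noConfusion (Option.some.inj htok)
          rw [if_pos hlv] at htok
          obtain ⟨k1, hk1, hk1le⟩ := pvIdx_exists ys i v hyi
          have hvidx : PySem.List.index? xs a = some k1 := by
            have h' := Option.some.inj htok
            obtain ⟨k0, hk0, _⟩ := pvIdx_exists xs i a hxi
            rw [hk0, hk1] at h'
            simp only [Option.getD_some] at h'
            have : k0 = k1 := by exact_mod_cast (PvTok.var.inj h')
            rw [hk0, this]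
          by_cases hvb : v = b
          · -- consistent: heads equal, recurse
            rw [if_neg (fun hcon => hcon hvb)]
            have hheads : (pvPattern xs)[n] = (pvPattern ys)[n] := by
              rw [hpaq, hpbq, if_pos hla, if_pos hlb, hvidx, ← hvb, hk1]
            have hrec := ih (n + 1) (by omega) (by omega) m u
              (by
                intro a' b'
                rw [hm a' b']
                constructor
                · rintro ⟨j, hj, h1, h2, h3⟩; exact ⟨j, by omega, h1, h2, h3⟩
                · rintro ⟨j, hj, h1, h2, h3⟩
                  rcases Nat.lt_or_ge j n with hjn | hjn
                  · exact ⟨j, hjn, h1, h2, h3⟩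
                  · have hj' : j = n := by omega
                    subst hj'
                    rw [hxn] at h1
                    rw [hyn] at h2
                    have e1 : a = a' := Option.some.inj h1
                    have e2 : b = b' := Option.some.inj h2
                    exact ⟨i, hi, e1 ▸ hxi, e2 ▸ hvb ▸ hyi, e1 ▸ hla⟩)
              (by
                intro b'
                rw [hu b']
                constructor
                · rintro ⟨j, hj, h1, h2⟩; exact ⟨j, by omega, h1, h2⟩
                · rintro ⟨j, hj, h1, h2⟩
                  rcases Nat.lt_or_ge j n with hjn | hjn
                  · exact ⟨j, hjn, h1, h2⟩
                  · have hj' : j = n := by omega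
                    subst hj'
                    rw [hyn] at h1
                    have e : b = b' := Option.some.inj h1
                    exact ⟨i, hi, e ▸ hvb ▸ hyi, h2⟩)
              (by
                intro j hj
                rcases Nat.lt_or_ge j n with hjn | hjn
                · exact hpat j hjn
                · have hj' : j = n := by omega
                  subst hj'
                  rw [List.getElem?_eq_getElem hpxlt, List.getElem?_eq_getElem hpylt, hheads])
            rw [hrec, decide_eq_decide]
            constructor
            · intro h; rw [hheads, h]
            · intro h; exact (List.cons.inj h).2
          · -- inconsistent: A returns false; heads must differ
            rw [if_pos hvb]
            obtain ⟨k2, hk2, _⟩ := pvIdx_exists ys n b hyn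
            have hneq : (pvPattern xs)[n] ≠ (pvPattern ys)[n] := by
              rw [hpaq, hpbq, if_pos hla, if_pos hlb, hvidx, hk2]
              intro hc
              have hc' := PvTok.var.inj hc
              simp only [Option.getD_some] at hc'
              have hkk : k1 = k2 := by exact_mod_cast hc'
              exact hvb (pvIdx_inj ys v b k2 (hkk ▸ hk1) hk2)
            symm
            rw [decide_eq_false_iff_not]
            intro hc
            exact hneq (List.cons.inj hc).1
        | none =>
          dsimp only
          -- a is fresh on the xs side
          have hfresh_x : ∀ j, j < n → xs[j]? ≠ some a := by
            intro j hj hc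
            have hyj : ys[j]? = some ys[j] := List.getElem?_eq_getElem (by omega)
            have : m.get? a = some ys[j] := (hm a ys[j]).2 ⟨j, hj, hc, hyj, hla⟩
            rw [hmv] at this; simp at this
          have hidxa : PySem.List.index? xs a = some n := pvIdx_fresh xs n a hxn hfresh_x
          cases huc : u.contains b with
          | true =>
            rw [if_pos rfl]
            obtain ⟨i, hi, hyi, _⟩ := (hu b).1 huc
            obtain ⟨k, hk, hki⟩ := pvIdx_exists ys i b hyi
            have hneq : (pvPattern xs)[n] ≠ (pvPattern ys)[n] := by
              rw [hpaq, hpbq, if_pos hla, if_pos hlb, hidxa, hk]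
              intro hc
              have hc' := PvTok.var.inj hc
              simp only [Option.getD_some] at hc'
              have : n = k := by exact_mod_cast hc'
              omega
            symm
            rw [decide_eq_false_iff_not]
            intro hc
            exact hneq (List.cons.inj hc).1
          | false =>
            rw [if_neg (Bool.false_ne_true)]
            have hfresh_y : ∀ j, j < n → ys[j]? ≠ some b := by
              intro j hj hc
              have : u.contains b = true := (hu b).2 ⟨j, hj, hc, hlb⟩
              rw [huc] at this; simp at this
            have hidxb : PySem.List.index? ys b = some n := pvIdx_fresh ys n b hyn hfresh_y
            have hheads : (pvPattern xs)[n] = (pvPattern ys)[n] := by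
              rw [hpaq, hpbq, if_pos hla, if_pos hlb, hidxa, hidxb]
            have hrec := ih (n + 1) (by omega) (by omega) (m.insert a b) (PySem.Set.add u b)
              (by
                intro a' b'
                rw [PySem.Dict.get?_insert]
                by_cases haa : a' = a
                · subst haa
                  rw [if_pos rfl]
                  constructor
                  · intro h'
                    have e : b = b' := Option.some.inj h'
                    exact ⟨n, by omega, hxn, e ▸ hyn, hla⟩
                  · rintro ⟨j, hj, h1, h2, h3⟩
                    rcases Nat.lt_or_ge j n with hjn | hjn
                    · exact absurd h1 (hfresh_x j hjn)
                    · have hj' : j = n := by omega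
                      subst hj'
                      rw [hyn] at h2
                      rw [Option.some.inj h2]
                · rw [if_neg haa, hm a' b']
                  constructor
                  · rintro ⟨j, hj, h1, h2, h3⟩; exact ⟨j, by omega, h1, h2, h3⟩
                  · rintro ⟨j, hj, h1, h2, h3⟩
                    rcases Nat.lt_or_ge j n with hjn | hjn
                    · exact ⟨j, hjn, h1, h2, h3⟩
                    · have hj' : j = n := by omega
                      subst hj'
                      rw [hxn] at h1
                      exact absurd (Option.some.inj h1).symm haa)
              (by
                intro b'
                constructor
                · intro h'
                  have hmem : b' ∈ PySem.Set.add u b := (PySem.Set.contains_iff _ _).1 h'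
                  rcases (PySem.Set.mem_add u b b').1 hmem with hin | heq
                  · obtain ⟨j, hj, h1, h2⟩ := (hu b').1 ((PySem.Set.contains_iff _ _).2 hin)
                    exact ⟨j, by omega, h1, h2⟩
                  · subst heq
                    exact ⟨n, by omega, hyn, hlb⟩
                · rintro ⟨j, hj, h1, h2⟩
                  apply (PySem.Set.contains_iff _ _).2
                  apply (PySem.Set.mem_add u b b').2
                  rcases Nat.lt_or_ge j n with hjn | hjn
                  · exact Or.inl ((PySem.Set.contains_iff _ _).1 ((hu b').2 ⟨j, hjn, h1, h2⟩))
                  · have hj' : j = n := by omega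
                    subst hj'
                    rw [hyn] at h1
                    exact Or.inr (Option.some.inj h1).symm)
              (by
                intro j hj
                rcases Nat.lt_or_ge j n with hjn | hjn
                · exact hpat j hjn
                · have hj' : j = n := by omega
                  subst hj'
                  rw [List.getElem?_eq_getElem hpxlt, List.getElem?_eq_getElem hpylt, hheads])
            rw [hrec, decide_eq_decide]
            constructor
            · intro h; rw [hheads, h]
            · intro h; exact (List.cons.inj h).2
      · -- a variable, b constant: false on both sides
        simp only [hla, hlb, Bool.and_false, Bool.false_eq_true, if_false, Bool.true_or, if_true]
        have hneq : (pvPattern xs)[n] ≠ (pvPattern ys)[n] := by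
          rw [hpaq, hpbq, if_pos hla, if_neg hlb]
          exact fun hc => PvTok.noConfusion hc
        symm
        rw [decide_eq_false_iff_not]
        intro hc
        exact hneq (List.cons.inj hc).1
    · by_cases hlb : pvIslower b = true
      · -- a constant, b variable: false on both sides
        simp only [hla, hlb, Bool.false_and, Bool.false_eq_true, if_false, Bool.or_true, if_true]
        have hneq : (pvPattern xs)[n] ≠ (pvPattern ys)[n] := by
          rw [hpaq, hpbq, if_neg hla, if_pos hlb]
          exact fun hc => PvTok.noConfusion hc
        symm
        rw [decide_eq_false_iff_not]
        intro hc
        exact hneq (List.cons.inj hc).1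
      · -- both constants
        simp only [hla, hlb, Bool.false_and, Bool.false_eq_true, if_false, Bool.or_self]
        by_cases hab : a = b
        · rw [if_neg (fun hcon => hcon hab)]
          have hheads : (pvPattern xs)[n] = (pvPattern ys)[n] := by
            rw [hpaq, hpbq, if_neg hla, if_neg hlb, hab]
          have hrec := ih (n + 1) (by omega) (by omega) m u
            (by
              intro a' b'
              rw [hm a' b']
              constructor
              · rintro ⟨j, hj, h1, h2, h3⟩; exact ⟨j, by omega, h1, h2, h3⟩
              · rintro ⟨j, hj, h1, h2, h3⟩
                rcases Nat.lt_or_ge j n with hjn | hjn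
                · exact ⟨j, hjn, h1, h2, h3⟩
                · have hj' : j = n := by omega
                  subst hj'
                  rw [hxn] at h1
                  rw [← Option.some.inj h1] at h3
                  exact absurd h3 hla)
            (by
              intro b'
              rw [hu b']
              constructor
              · rintro ⟨j, hj, h1, h2⟩; exact ⟨j, by omega, h1, h2⟩
              · rintro ⟨j, hj, h1, h2⟩
                rcases Nat.lt_or_ge j n with hjn | hjn
                · exact ⟨j, hjn, h1, h2⟩
                · have hj' : j = n := by omega
                  subst hj'
                  rw [hyn] at h1
                  rw [← Option.some.inj h1] at h2
                  exact absurd h2 hlb)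
            (by
              intro j hj
              rcases Nat.lt_or_ge j n with hjn | hjn
              · exact hpat j hjn
              · have hj' : j = n := by omega
                subst hj'
                rw [List.getElem?_eq_getElem hpxlt, List.getElem?_eq_getElem hpylt, hheads])
          rw [hrec, decide_eq_decide]
          constructor
          · intro h; rw [hheads, h]
          · intro h; exact (List.cons.inj h).2
        · rw [if_pos hab]
          have hneq : (pvPattern xs)[n] ≠ (pvPattern ys)[n] := by
            rw [hpaq, hpbq, if_neg hla, if_neg hlb]
            exact fun hc => hab (PvTok.const.inj hc)
          symm
          rw [decide_eq_false_iff_not]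
          intro hc
          exact hneq (List.cons.inj hc).1

-- ===== VERDICT (by name: the statement is the Claim_ definition above) =====
theorem is_isomorphic_args_spec : Claim_equal_is_isomorphic_args := by
  intro args1 args2 _
  unfold Spec_is_isomorphic_args is_isomorphic_args is_isomorphic_args_alt
  by_cases hlen : args1.length = args2.length
  · rw [if_neg (fun hc => hc hlen)]
    have := pvLoop_eq args1 args2 hlen args1.length 0 (by omega) (by omega)
      PySem.Dict.empty PySem.Set.empty
      (by
        intro a b
        constructor
        · intro h; simp [PySem.Dict.get?_empty] at h
        · rintro ⟨j, hj, _⟩; omega)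
      (by
        intro b
        constructor
        · intro h
          exact absurd ((PySem.Set.contains_iff _ _).1 h) (List.not_mem_nil)
        · rintro ⟨j, hj, _⟩; omega)
      (by intro i hi; omega)
    simpa using this
  · rw [if_pos hlen]
    have hne : pvPattern args1 ≠ pvPattern args2 := by
      intro hc
      have := congrArg List.length hc
      rw [pvPattern_length, pvPattern_length] at this
      exact hlen this
    symm
    rw [decide_eq_false_iff_not]
    exact hne
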